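-- pv_equiv track=rewrite | github.com/GlebikGlebik/algorithms-and-data-structures | lab2/task9/src/Strassens_method_for_matrix_multiplication.py | strassen_multiplication
-- ===== SOURCE A (Python) =====
-- def strassen_multiplication(a, b, n):
--     """
--     Умножение матриц методом Штрасса.
--     :param a: первая матрица
--     :param b: вторая матрица
--     :param n: порядок матриц (размерность)
--     :return: произведение матриц a и b
--     """
--     if n == 1:
--         return [[a[0][0] * b[0][0]]]
--
--     mid = n // 2
--
--     # Разделяем матрицы на 4 подматрицы
--     a11 = [row[:mid] for row in a[:mid]]
--     a12 = [row[mid:] for row in a[:mid]]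
--     a21 = [row[:mid] for row in a[mid:]]
--     a22 = [row[mid:] for row in a[mid:]]
--
--     b11 = [row[:mid] for row in b[:mid]]
--     b12 = [row[mid:] for row in b[:mid]]
--     b21 = [row[:mid] for row in b[mid:]]
--     b22 = [row[mid:] for row in b[mid:]]
--
--     # Вычисляем 7 произведений
--     m1 = strassen_multiplication(matrix_sum(a11, a22), matrix_sum(b11, b22), mid)
--     m2 = strassen_multiplication(matrix_sum(a21, a22), b11, mid)
--     m3 = strassen_multiplication(a11, matrix_minus(b12, b22), mid)
--     m4 = strassen_multiplication(a22, matrix_minus(b21, b11), mid)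
--     m5 = strassen_multiplication(matrix_sum(a11, a12), b22, mid)
--     m6 = strassen_multiplication(matrix_minus(a21, a11), matrix_sum(b11, b12), mid)
--     m7 = strassen_multiplication(matrix_minus(a12, a22), matrix_sum(b21, b22), mid)
--
--     # Собираем результаты в итоговую матрицу
--     c11 = matrix_sum(matrix_minus(matrix_sum(m1, m4), m5), m7)
--     c12 = matrix_sum(m3, m5)
--     c21 = matrix_sum(m2, m4)
--     c22 = matrix_sum(matrix_minus(matrix_sum(m1, m3), m2), m6)
--
--     # Формируем новую матрицу
--     new_matrix = []
--     for i in range(mid):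
--         new_matrix.append(c11[i] + c12[i])
--     for i in range(mid):
--         new_matrix.append(c21[i] + c22[i])
--
--     return new_matrix
--
-- def matrix_sum(a, b):
--     return [[a[i][j] + b[i][j] for j in range(len(a[0]))] for i in range(len(a))]
--
-- def matrix_minus(a, b):
--     return [[a[i][j] - b[i][j] for j in range(len(a[0]))] for i in range(len(a))]
-- ===== SOURCE B (Python) =====
-- def strassen_multiplication(a, b, n):
--     """
--     Умножение матриц по определению: result[i][j] = sum_k a[i][k] * b[k][j].
--     :param a: первая матрица
--     :param b: вторая матрица
--     :param n: порядок матриц (размерность)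
--     :return: произведение матриц a и b
--     """
--     if n < 1:
--         raise ValueError("matrix order must be at least 1")
--     return [[sum(a[i][k] * b[k][j] for k in range(n)) for j in range(n)] for i in range(n)]
-- ===== Notes on version B (the rewrite author's own statement) =====
-- stated objective: simpler
-- what changed: Replaces Strassen's recursive divide-and-conquer (submatrix splitting, 7 recursive products, matrix_sum/matrix_minus recombination) with the direct definition of the matrix product as a single nested comprehension summing a[i][k]*b[k][j] over k.
-- outside the precondition, e.g. on strassen_multiplication([[8, 1], [1, 0]], [[1, 0], [8, 1]], 3): A returns [[16, 1], [1, 0]], B raises IndexError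
import Mathlib
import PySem

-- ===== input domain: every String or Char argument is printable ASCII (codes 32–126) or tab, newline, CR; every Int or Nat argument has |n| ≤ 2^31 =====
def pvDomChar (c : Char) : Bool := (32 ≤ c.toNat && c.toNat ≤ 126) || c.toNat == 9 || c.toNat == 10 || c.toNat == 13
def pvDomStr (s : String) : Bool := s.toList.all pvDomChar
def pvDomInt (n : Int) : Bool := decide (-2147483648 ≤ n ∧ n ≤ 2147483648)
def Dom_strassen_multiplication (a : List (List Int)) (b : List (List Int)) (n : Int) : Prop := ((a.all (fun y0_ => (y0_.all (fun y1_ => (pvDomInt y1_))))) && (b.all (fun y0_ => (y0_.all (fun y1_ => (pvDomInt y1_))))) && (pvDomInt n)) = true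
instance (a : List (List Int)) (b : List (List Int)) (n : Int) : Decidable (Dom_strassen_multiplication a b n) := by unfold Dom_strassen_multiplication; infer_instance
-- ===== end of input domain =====

-- B replaces Strassen's divide-and-conquer with the direct definition of the matrix
-- product (one nested comprehension summing a[i][k]*b[k][j] over k): simpler, no recursion.

-- ===== PORT A =====
-- matrix_sum
def pv_msum (a b : List (List Int)) : List (List Int) :=
  (PySem.List.pyRange 0 (a.length : Int) 1).map (fun i =>
    (PySem.List.pyRange 0 ((PySem.List.pyGetD a 0 []).length : Int) 1).map (fun j =>
      PySem.List.pyGetD (PySem.List.pyGetD a i []) j 0 + PySem.List.pyGetD (PySem.List.pyGetD b i []) j 0))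

-- matrix_minus
def pv_mminus (a b : List (List Int)) : List (List Int) :=
  (PySem.List.pyRange 0 (a.length : Int) 1).map (fun i =>
    (PySem.List.pyRange 0 ((PySem.List.pyGetD a 0 []).length : Int) 1).map (fun j =>
      PySem.List.pyGetD (PySem.List.pyGetD a i []) j 0 - PySem.List.pyGetD (PySem.List.pyGetD b i []) j 0))

-- Python's recursion carries no fuel; the fuel only makes the same computation total
-- (for n ≤ 0 Python never returns — excluded by Pre_).
def strassenFuel : Nat → List (List Int) → List (List Int) → Int → List (List Int)
  | 0, _, _, _ => []
  | fuel+1, a, b, n =>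
    if n = 1 then
      [[PySem.List.pyGetD (PySem.List.pyGetD a 0 []) 0 0 * PySem.List.pyGetD (PySem.List.pyGetD b 0 []) 0 0]]
    else
      let mid := PySem.Int.floordiv n 2
      let a11 := (PySem.List.slice a none (some mid)).map (fun r => PySem.List.slice r none (some mid))
      let a12 := (PySem.List.slice a none (some mid)).map (fun r => PySem.List.slice r (some mid) none)
      let a21 := (PySem.List.slice a (some mid) none).map (fun r => PySem.List.slice r none (some mid))
      let a22 := (PySem.List.slice a (some mid) none).map (fun r => PySem.List.slice r (some mid) none)
      let b11 := (PySem.List.slice b none (some mid)).map (fun r => PySem.List.slice r none (some mid))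
      let b12 := (PySem.List.slice b none (some mid)).map (fun r => PySem.List.slice r (some mid) none)
      let b21 := (PySem.List.slice b (some mid) none).map (fun r => PySem.List.slice r none (some mid))
      let b22 := (PySem.List.slice b (some mid) none).map (fun r => PySem.List.slice r (some mid) none)
      let m1 := strassenFuel fuel (pv_msum a11 a22) (pv_msum b11 b22) mid
      let m2 := strassenFuel fuel (pv_msum a21 a22) b11 mid
      let m3 := strassenFuel fuel a11 (pv_mminus b12 b22) mid
      let m4 := strassenFuel fuel a22 (pv_mminus b21 b11) mid
      let m5 := strassenFuel fuel (pv_msum a11 a12) b22 mid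
      let m6 := strassenFuel fuel (pv_mminus a21 a11) (pv_msum b11 b12) mid
      let m7 := strassenFuel fuel (pv_mminus a12 a22) (pv_msum b21 b22) mid
      let c11 := pv_msum (pv_mminus (pv_msum m1 m4) m5) m7
      let c12 := pv_msum m3 m5
      let c21 := pv_msum m2 m4
      let c22 := pv_msum (pv_mminus (pv_msum m1 m3) m2) m6
      let nm1 := (PySem.List.pyRange 0 mid 1).foldl
        (fun acc i => acc ++ [PySem.List.pyGetD c11 i [] ++ PySem.List.pyGetD c12 i []]) []
      let nm2 := (PySem.List.pyRange 0 mid 1).foldl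
        (fun acc i => acc ++ [PySem.List.pyGetD c21 i [] ++ PySem.List.pyGetD c22 i []]) nm1
      nm2

def strassen_multiplication (a : List (List Int)) (b : List (List Int)) (n : Int) : List (List Int) :=
  strassenFuel (n.toNat + 1) a b n

-- ===== PORT B =====
-- for n < 1 the Python raises ValueError (unreachable under Pre_); the port returns []
def strassen_multiplication_alt (a : List (List Int)) (b : List (List Int)) (n : Int) : List (List Int) :=
  if n < 1 then []
  else (PySem.List.pyRange 0 n 1).map (fun i =>
    (PySem.List.pyRange 0 n 1).map (fun j =>
      ((PySem.List.pyRange 0 n 1).map (fun k =>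
        PySem.List.pyGetD (PySem.List.pyGetD a i []) k 0 * PySem.List.pyGetD (PySem.List.pyGetD b k []) j 0)).sum))

-- ===== PRECONDITION & SPEC =====
-- n is a power of two (1 ≤ n and n = 2^(bitlength n - 1))
def pvPow2 (n : Int) : Prop := 1 ≤ n ∧ n = 2 ^ (PySem.Int.bitLength n - 1)
-- m is an n×n matrix
def pvSq (m : List (List Int)) (n : Int) : Prop := m.length = n.toNat ∧ ∀ r ∈ m, r.length = n.toNat

-- m has two rows, the first with at least 2 entries and the second at least as long
def pvWide2 (m : List (List Int)) : Prop :=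
  m.length = 2 ∧ 2 ≤ (m.getD 0 []).length ∧ (m.getD 0 []).length ≤ (m.getD 1 []).length

-- Pre_ is Strassen's documented domain: square matrices of power-of-two order n, plus the
-- inputs with extra entries that A's slicing tolerates and where it still returns: any
-- matrices with a[0][0]/b[0][0] for n = 1, and for n = 2 any two-row matrices whose first
-- row has ≥ 2 entries and whose second row is at least as long.  On every other input A
-- raises (IndexError from mismatched submatrices, or unbounded recursion for n ≤ 0),
-- except on shapes whose accesses line up by accident: rare ragged matrices at n ≥ 4, and
-- matrices with fewer than n rows (e.g. n = 3 on two-row matrices, where A returns a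
-- truncated product of the leading block while B rejects the input); see cites.
def Pre_strassen_multiplication (a : List (List Int)) (b : List (List Int)) (n : Int) : Prop :=
  (n = 1 ∧ a ≠ [] ∧ a.getD 0 [] ≠ [] ∧ b ≠ [] ∧ b.getD 0 [] ≠ []) ∨
  (n = 2 ∧ pvWide2 a ∧ pvWide2 b) ∨
  (pvPow2 n ∧ pvSq a n ∧ pvSq b n)
instance (a : List (List Int)) (b : List (List Int)) (n : Int) : Decidable (Pre_strassen_multiplication a b n) := by
  unfold Pre_strassen_multiplication pvWide2 pvPow2 pvSq; infer_instance

def pvWitness_strassen_multiplication : List (List Int) × List (List Int) × Int :=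
  ([[1, 2], [3, 4]], [[5, 6], [7, 8]], 2)

def Spec_strassen_multiplication (a : List (List Int)) (b : List (List Int)) (n : Int) (out : List (List Int)) : Prop := out = strassen_multiplication_alt a b n
instance (a : List (List Int)) (b : List (List Int)) (n : Int) (out : List (List Int)) : Decidable (Spec_strassen_multiplication a b n out) := by unfold Spec_strassen_multiplication; infer_instance

-- ===== CLAIM (what is proved, stated in full; the proofs are below) =====
def Claim_equal_strassen_multiplication : Prop := ∀ (a : List (List Int)) (b : List (List Int)) (n : Int), Dom_strassen_multiplication a b n → Pre_strassen_multiplication a b n → Spec_strassen_multiplication a b n (strassen_multiplication a b n)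

-- ===== LEMMAS AND PROOFS =====
-- entry (i,j) of a matrix (0 outside)
def entM (m : List (List Int)) (i j : Nat) : Int := (m.getD i []).getD j 0
-- the s×s matrix with entries f i j
def mkM (s : Nat) (f : Nat → Nat → Int) : List (List Int) :=
  (List.range s).map (fun i => (List.range s).map (f i))
-- entry (i,j) of the product of two s×s matrices given by entry functions
def mulE (s : Nat) (A B : Nat → Nat → Int) (i j : Nat) : Int :=
  ∑ k ∈ Finset.range s, A i k * B k j
-- Nat-sided squareness
def sqN (m : List (List Int)) (s : Nat) : Prop := m.length = s ∧ ∀ r ∈ m, r.length = s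

lemma sum_map_range_eq (s : Nat) (f : Nat → Int) :
    ((List.range s).map f).sum = ∑ k ∈ Finset.range s, f k := rfl

lemma length_mkM (s : Nat) (f : Nat → Nat → Int) : (mkM s f).length = s := by
  simp [mkM]

lemma sqN_mkM (s : Nat) (f : Nat → Nat → Int) : sqN (mkM s f) s := by
  constructor
  · simp [mkM]
  · intro r hr
    simp [mkM] at hr
    obtain ⟨i, _, rfl⟩ := hr
    simp

lemma getD_mkM (s : Nat) (f : Nat → Nat → Int) (i : Nat) (hi : i < s) :
    (mkM s f).getD i [] = (List.range s).map (f i) := by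
  simpa [mkM] using PySem.List.getD_map_range (fun i => (List.range s).map (f i)) s i [] hi

lemma entM_mkM (s : Nat) (f : Nat → Nat → Int) (i j : Nat) (hi : i < s) (hj : j < s) :
    entM (mkM s f) i j = f i j := by
  rw [entM, getD_mkM s f i hi, PySem.List.getD_map_range _ s j 0 hj]

lemma mkM_congr (s : Nat) (f g : Nat → Nat → Int)
    (h : ∀ i < s, ∀ j < s, f i j = g i j) : mkM s f = mkM s g := by
  unfold mkM
  refine List.map_congr_left (fun i hi => ?_)
  refine List.map_congr_left (fun j hj => ?_)
  exact h i (List.mem_range.mp hi) j (List.mem_range.mp hj)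

lemma mulE_congr (s : Nat) (A A' B B' : Nat → Nat → Int)
    (hA : ∀ i < s, ∀ k < s, A i k = A' i k) (hB : ∀ k < s, ∀ j < s, B k j = B' k j)
    (i j : Nat) (hi : i < s) (hj : j < s) : mulE s A B i j = mulE s A' B' i j := by
  unfold mulE
  refine Finset.sum_congr rfl (fun k hk => ?_)
  rw [hA i hi k (Finset.mem_range.mp hk), hB k (Finset.mem_range.mp hk) j hj]

-- matrix_sum on s×s matrices is the entrywise sum
lemma msum_mk (a b : List (List Int)) (s : Nat) (hs : 0 < s) (ha : sqN a s) :
    pv_msum a b = mkM s (fun i j => entM a i j + entM b i j) := by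
  obtain ⟨hal, har⟩ := ha
  have hne : 0 < a.length := by omega
  have h00 : a.getD 0 [] = a[0]'hne := by
    rw [List.getD_eq_getElem?_getD, List.getElem?_eq_getElem hne, Option.getD_some]
  have h0 : (PySem.List.pyGetD a 0 []).length = s := by
    rw [PySem.List.pyGetD_zero, h00]
    exact har _ (List.getElem_mem hne)
  unfold pv_msum mkM entM
  rw [hal, h0, PySem.List.pyRange_zero_natCast]
  simp [List.map_map, Function.comp_def, PySem.List.pyGetD_natCast]

lemma mminus_mk (a b : List (List Int)) (s : Nat) (hs : 0 < s) (ha : sqN a s) :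
    pv_mminus a b = mkM s (fun i j => entM a i j - entM b i j) := by
  obtain ⟨hal, har⟩ := ha
  have hne : 0 < a.length := by omega
  have h00 : a.getD 0 [] = a[0]'hne := by
    rw [List.getD_eq_getElem?_getD, List.getElem?_eq_getElem hne, Option.getD_some]
  have h0 : (PySem.List.pyGetD a 0 []).length = s := by
    rw [PySem.List.pyGetD_zero, h00]
    exact har _ (List.getElem_mem hne)
  unfold pv_mminus mkM entM
  rw [hal, h0, PySem.List.pyRange_zero_natCast]
  simp [List.map_map, Function.comp_def, PySem.List.pyGetD_natCast]

-- a quadrant of a square matrix, as an entry function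
lemma quad_eq (m : List (List Int)) (S s p q : Nat) (hm : sqN m S)
    (hp : p + s ≤ S) (hq : q + s ≤ S) :
    ((m.drop p).take s).map (fun r => (r.drop q).take s)
      = mkM s (fun i j => entM m (p + i) (q + j)) := by
  obtain ⟨hml, hrow⟩ := hm
  have hL : (((m.drop p).take s).map (fun r => (r.drop q).take s)).length = s := by
    simp [hml]; omega
  apply List.ext_getElem (by rw [hL, length_mkM])
  intro i h1 h2
  have hi : i < s := hL ▸ h1
  have hpi : p + i < m.length := by omega
  have hrl : (m[p + i]'hpi).length = S := hrow _ (List.getElem_mem hpi)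
  simp only [List.getElem_map, mkM, List.getElem_range]
  have e1 : ((m.drop p).take s)[i]'(by simp [hml]; omega) = m[p + i]'hpi := by
    simp [List.getElem_take, List.getElem_drop]
  rw [e1]
  have hL2 : (((m[p + i]'hpi).drop q).take s).length = s := by simp [hrl]; omega
  apply List.ext_getElem (by simp [hL2])
  intro j g1 g2
  have hj : j < s := hL2 ▸ g1
  have hqj : q + j < (m[p + i]'hpi).length := by omega
  simp only [List.getElem_map, List.getElem_range]
  have e2 : (((m[p + i]'hpi).drop q).take s)[j]'(by simp [hrl]; omega) = (m[p + i]'hpi)[q + j]'hqj := by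
    simp [List.getElem_take, List.getElem_drop]
  rw [e2, entM]
  have e3 : m.getD (p + i) [] = m[p + i]'hpi := by
    rw [List.getD_eq_getElem?_getD, List.getElem?_eq_getElem hpi, Option.getD_some]
  rw [e3, List.getD_eq_getElem?_getD, List.getElem?_eq_getElem hqj, Option.getD_some]

-- the four quadrant slices of a (s+s)×(s+s) matrix, as entry functions
lemma quad11 (m : List (List Int)) (s : Nat) (hm : sqN m (s + s)) :
    (PySem.List.slice m none (some ((s : Nat) : Int))).map
        (fun r => PySem.List.slice r none (some ((s : Nat) : Int)))
      = mkM s (fun i j => entM m i j) := by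
  have h := quad_eq m (s + s) s 0 0 hm (by omega) (by omega)
  simpa [PySem.List.slice_to_natCast] using h

lemma quad12 (m : List (List Int)) (s : Nat) (hm : sqN m (s + s)) :
    (PySem.List.slice m none (some ((s : Nat) : Int))).map
        (fun r => PySem.List.slice r (some ((s : Nat) : Int)) none)
      = mkM s (fun i j => entM m i (s + j)) := by
  simp only [PySem.List.slice_to_natCast, PySem.List.slice_from_natCast]
  have h := quad_eq m (s + s) s 0 s hm (by omega) (by omega)
  simp only [List.drop_zero, Nat.zero_add] at h
  rw [← h]
  refine List.map_congr_left (fun r hr => ?_)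
  have hrl : r.length = s + s := hm.2 r (List.mem_of_mem_take hr)
  exact (List.take_of_length_le (by simp [hrl])).symm

lemma quad21 (m : List (List Int)) (s : Nat) (hm : sqN m (s + s)) :
    (PySem.List.slice m (some ((s : Nat) : Int)) none).map
        (fun r => PySem.List.slice r none (some ((s : Nat) : Int)))
      = mkM s (fun i j => entM m (s + i) j) := by
  simp only [PySem.List.slice_to_natCast, PySem.List.slice_from_natCast]
  have h := quad_eq m (s + s) s s 0 hm (by omega) (by omega)
  simp only [List.drop_zero, Nat.zero_add] at h
  rw [List.take_of_length_le (by simp [hm.1])] at h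
  exact h

lemma quad22 (m : List (List Int)) (s : Nat) (hm : sqN m (s + s)) :
    (PySem.List.slice m (some ((s : Nat) : Int)) none).map
        (fun r => PySem.List.slice r (some ((s : Nat) : Int)) none)
      = mkM s (fun i j => entM m (s + i) (s + j)) := by
  simp only [PySem.List.slice_from_natCast]
  have h := quad_eq m (s + s) s s s hm (by omega) (by omega)
  rw [List.take_of_length_le (by simp [hm.1])] at h
  rw [← h]
  refine List.map_congr_left (fun r hr => ?_)
  have hrl : r.length = s + s := hm.2 r (List.mem_of_mem_drop hr)
  exact (List.take_of_length_le (by simp [hrl])).symm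

-- a (s+s)×(s+s) matrix built from its four quadrant entry functions
lemma mkM_glue (s : Nat) (G : Nat → Nat → Int) :
    mkM (s + s) G =
      (List.range s).map (fun i =>
        (List.range s).map (fun j => G i j) ++ (List.range s).map (fun j => G i (s + j)))
      ++ (List.range s).map (fun i =>
        (List.range s).map (fun j => G (s + i) j) ++ (List.range s).map (fun j => G (s + i) (s + j))) := by
  simp [mkM, List.range_add, List.map_map, Function.comp_def]

-- Strassen's four scalar recombination identities
lemma strassen_c11 (s : Nat) (A B : Nat → Nat → Int) (i j : Nat) :
    ((mulE s (fun p q => A p q + A (s + p) (s + q)) (fun p q => B p q + B (s + p) (s + q)) i j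
      + mulE s (fun p q => A (s + p) (s + q)) (fun p q => B (s + p) q - B p q) i j)
      - mulE s (fun p q => A p q + A p (s + q)) (fun p q => B (s + p) (s + q)) i j)
      + mulE s (fun p q => A p (s + q) - A (s + p) (s + q)) (fun p q => B (s + p) q + B (s + p) (s + q)) i j
    = mulE (s + s) A B i j := by
  unfold mulE
  rw [Finset.sum_range_add]
  simp only [← Finset.sum_add_distrib, ← Finset.sum_sub_distrib]
  exact Finset.sum_congr rfl (fun k _ => by ring)

lemma strassen_c12 (s : Nat) (A B : Nat → Nat → Int) (i j : Nat) :
    mulE s (fun p q => A p q) (fun p q => B p (s + q) - B (s + p) (s + q)) i j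
      + mulE s (fun p q => A p q + A p (s + q)) (fun p q => B (s + p) (s + q)) i j
    = mulE (s + s) A B i (s + j) := by
  unfold mulE
  rw [Finset.sum_range_add]
  simp only [← Finset.sum_add_distrib]
  exact Finset.sum_congr rfl (fun k _ => by ring)

lemma strassen_c21 (s : Nat) (A B : Nat → Nat → Int) (i j : Nat) :
    mulE s (fun p q => A (s + p) q + A (s + p) (s + q)) (fun p q => B p q) i j
      + mulE s (fun p q => A (s + p) (s + q)) (fun p q => B (s + p) q - B p q) i j
    = mulE (s + s) A B (s + i) j := by
  unfold mulE
  rw [Finset.sum_range_add]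
  simp only [← Finset.sum_add_distrib]
  exact Finset.sum_congr rfl (fun k _ => by ring)

lemma strassen_c22 (s : Nat) (A B : Nat → Nat → Int) (i j : Nat) :
    ((mulE s (fun p q => A p q + A (s + p) (s + q)) (fun p q => B p q + B (s + p) (s + q)) i j
      + mulE s (fun p q => A p q) (fun p q => B p (s + q) - B (s + p) (s + q)) i j)
      - mulE s (fun p q => A (s + p) q + A (s + p) (s + q)) (fun p q => B p q) i j)
      + mulE s (fun p q => A (s + p) q - A p q) (fun p q => B p q + B p (s + q)) i j
    = mulE (s + s) A B (s + i) (s + j) := by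
  unfold mulE
  rw [Finset.sum_range_add]
  simp only [← Finset.sum_add_distrib, ← Finset.sum_sub_distrib]
  exact Finset.sum_congr rfl (fun k _ => by ring)

-- the core induction: on 2^k × 2^k matrices, Strassen computes the product
lemma strassen_pow2 (k : Nat) : ∀ (f : Nat) (a b : List (List Int)), k < f →
    sqN a (2 ^ k) → sqN b (2 ^ k) →
    strassenFuel f a b ((2 ^ k : Nat) : Int) = mkM (2 ^ k) (mulE (2 ^ k) (entM a) (entM b)) := by
  induction k with
  | zero =>
    intro f a b hf ha hb
    cases f with
    | zero => exact absurd hf (by omega)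
    | succ f =>
      obtain ⟨hal, har⟩ := ha
      obtain ⟨hbl, hbr⟩ := hb
      simp only [pow_zero] at hal har hbl hbr
      obtain ⟨x, rfl⟩ : ∃ x, a = [[x]] := by
        match a, hal with
        | [r], _ =>
          have hr := har r (by simp)
          match r, hr with
          | [x], _ => exact ⟨x, rfl⟩
      obtain ⟨y, rfl⟩ : ∃ y, b = [[y]] := by
        match b, hbl with
        | [r], _ =>
          have hr := hbr r (by simp)
          match r, hr with
          | [y], _ => exact ⟨y, rfl⟩
      show strassenFuel (f + 1) [[x]] [[y]] ((2 ^ 0 : Nat) : Int) = _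
      norm_num [strassenFuel, mkM, mulE, entM, Finset.sum_range_one, PySem.List.pyGetD_zero]
  | succ k ih =>
    intro f a b hf ha hb
    cases f with
    | zero => exact absurd hf (by omega)
    | succ f =>
      have hfk : k < f := by omega
      have hspos : 0 < 2 ^ k := by positivity
      have hSS : (2 ^ (k + 1) : Nat) = 2 ^ k + 2 ^ k := by rw [pow_succ, Nat.mul_two]
      have h2 : (2 : Nat) ≤ 2 ^ (k + 1) := by
        calc (2 : Nat) = 2 ^ 1 := rfl
        _ ≤ 2 ^ (k + 1) := Nat.pow_le_pow_right (by omega) (by omega)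
      have hn1 : ((2 ^ (k + 1) : Nat) : Int) ≠ 1 := by
        simp only [ne_eq, Nat.cast_eq_one]; omega
      have hmid : PySem.Int.floordiv ((2 ^ (k + 1) : Nat) : Int) 2 = ((2 ^ k : Nat) : Int) := by
        rw [PySem.Int.floordiv_eq_ediv_of_pos (by norm_num)]
        push_cast [pow_succ]
        rw [Int.mul_ediv_cancel _ (by norm_num)]
      have haN : sqN a (2 ^ k + 2 ^ k) := hSS ▸ ha
      have hbN : sqN b (2 ^ k + 2 ^ k) := hSS ▸ hb
      have hsum : ∀ g h : Nat → Nat → Int,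
          pv_msum (mkM (2 ^ k) g) (mkM (2 ^ k) h) = mkM (2 ^ k) (fun i j => g i j + h i j) := by
        intro g h
        rw [msum_mk _ _ (2 ^ k) hspos (sqN_mkM _ _)]
        exact mkM_congr _ _ _ (fun i hi j hj => by
          rw [entM_mkM _ _ _ _ hi hj, entM_mkM _ _ _ _ hi hj])
      have hsub : ∀ g h : Nat → Nat → Int,
          pv_mminus (mkM (2 ^ k) g) (mkM (2 ^ k) h) = mkM (2 ^ k) (fun i j => g i j - h i j) := by
        intro g h
        rw [mminus_mk _ _ (2 ^ k) hspos (sqN_mkM _ _)]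
        exact mkM_congr _ _ _ (fun i hi j hj => by
          rw [entM_mkM _ _ _ _ hi hj, entM_mkM _ _ _ _ hi hj])
      have hstep : ∀ g h : Nat → Nat → Int,
          strassenFuel f (mkM (2 ^ k) g) (mkM (2 ^ k) h) ((2 ^ k : Nat) : Int)
            = mkM (2 ^ k) (mulE (2 ^ k) g h) := by
        intro g h
        rw [ih f _ _ hfk (sqN_mkM _ _) (sqN_mkM _ _)]
        exact mkM_congr _ _ _ (fun i hi j hj =>
          mulE_congr _ _ _ _ _ (fun p hp q hq => entM_mkM _ _ _ _ hp hq)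
            (fun p hp q hq => entM_mkM _ _ _ _ hp hq) i j hi hj)
      simp only [strassenFuel]
      rw [if_neg hn1]
      simp only [hmid]
      rw [quad11 a _ haN, quad12 a _ haN, quad21 a _ haN, quad22 a _ haN,
          quad11 b _ hbN, quad12 b _ hbN, quad21 b _ hbN, quad22 b _ hbN]
      simp only [hsum, hsub, hstep]
      rw [PySem.List.foldl_append_singleton_eq_map, PySem.List.foldl_append_singleton_eq_map,
          List.nil_append, PySem.List.pyRange_zero_natCast]
      simp only [List.map_map, Function.comp_def, PySem.List.pyGetD_natCast]
      rw [hSS, mkM_glue]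
      refine congrArg₂ (· ++ ·) ?_ ?_ <;>
        refine List.map_congr_left (fun i hi => ?_)
      · have hi' : i < 2 ^ k := List.mem_range.mp hi
        rw [getD_mkM _ _ _ hi', getD_mkM _ _ _ hi']
        refine congrArg₂ (· ++ ·) ?_ ?_ <;> refine List.map_congr_left (fun j hj => ?_)
        · exact strassen_c11 (2 ^ k) (entM a) (entM b) i j
        · exact strassen_c12 (2 ^ k) (entM a) (entM b) i j
      · have hi' : i < 2 ^ k := List.mem_range.mp hi
        rw [getD_mkM _ _ _ hi', getD_mkM _ _ _ hi']
        refine congrArg₂ (· ++ ·) ?_ ?_ <;> refine List.map_congr_left (fun j hj => ?_)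
        · exact strassen_c21 (2 ^ k) (entM a) (entM b) i j
        · exact strassen_c22 (2 ^ k) (entM a) (entM b) i j

-- B's port on n = S is the product matrix in mkM form (no shape assumptions needed)
lemma alt_mkM (a b : List (List Int)) (S : Nat) :
    strassen_multiplication_alt a b (S : Int) = mkM S (mulE S (entM a) (entM b)) := by
  unfold strassen_multiplication_alt mkM mulE entM
  split_ifs with h
  · have hS : S = 0 := by omega
    subst hS
    simp
  rw [PySem.List.pyRange_zero_natCast]
  simp [List.map_map, Function.comp_def, PySem.List.pyGetD_natCast, sum_map_range_eq]

-- base case of the recursion, fuel 2, as a rewrite rule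
lemma fuel_one2 (x y : List (List Int)) :
    strassenFuel 2 x y 1 =
      [[PySem.List.pyGetD (PySem.List.pyGetD x 0 []) 0 0
        * PySem.List.pyGetD (PySem.List.pyGetD y 0 []) 0 0]] := rfl

-- the (0,0) entry of matrix_sum / matrix_minus of nonempty matrices
lemma ent00_msum (u v : List (List Int)) (hu : u ≠ []) (hr : PySem.List.pyGetD u 0 [] ≠ []) :
    PySem.List.pyGetD (PySem.List.pyGetD (pv_msum u v) 0 []) 0 0
      = PySem.List.pyGetD (PySem.List.pyGetD u 0 []) 0 0
        + PySem.List.pyGetD (PySem.List.pyGetD v 0 []) 0 0 := by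
  unfold pv_msum
  simp only [PySem.List.pyRange_one_cons
      (show (0 : Int) < (u.length : Int) by exact_mod_cast List.length_pos_iff.mpr hu),
    PySem.List.pyRange_one_cons
      (show (0 : Int) < ((PySem.List.pyGetD u 0 []).length : Int) by
        exact_mod_cast List.length_pos_iff.mpr hr),
    List.map_cons, PySem.List.pyGetD_zero_cons]

lemma ent00_mminus (u v : List (List Int)) (hu : u ≠ []) (hr : PySem.List.pyGetD u 0 [] ≠ []) :
    PySem.List.pyGetD (PySem.List.pyGetD (pv_mminus u v) 0 []) 0 0
      = PySem.List.pyGetD (PySem.List.pyGetD u 0 []) 0 0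
        - PySem.List.pyGetD (PySem.List.pyGetD v 0 []) 0 0 := by
  unfold pv_mminus
  simp only [PySem.List.pyRange_one_cons
      (show (0 : Int) < (u.length : Int) by exact_mod_cast List.length_pos_iff.mpr hu),
    PySem.List.pyRange_one_cons
      (show (0 : Int) < ((PySem.List.pyGetD u 0 []).length : Int) by
        exact_mod_cast List.length_pos_iff.mpr hr),
    List.map_cons, PySem.List.pyGetD_zero_cons]

-- unconditional (0,0)-entry rules for matrix_sum / matrix_minus on cons-shaped input
lemma ent00_msum' (r : Int) (rs : List Int) (R v : List (List Int)) :
    PySem.List.pyGetD (PySem.List.pyGetD (pv_msum ((r :: rs) :: R) v) 0 []) 0 0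
      = r + PySem.List.pyGetD (PySem.List.pyGetD v 0 []) 0 0 := by
  have h := ent00_msum ((r :: rs) :: R) v (by simp) (by simp [PySem.List.pyGetD_zero_cons])
  simpa [PySem.List.pyGetD_zero_cons] using h

lemma ent00_mminus' (r : Int) (rs : List Int) (R v : List (List Int)) :
    PySem.List.pyGetD (PySem.List.pyGetD (pv_mminus ((r :: rs) :: R) v) 0 []) 0 0
      = r - PySem.List.pyGetD (PySem.List.pyGetD v 0 []) 0 0 := by
  have h := ent00_mminus ((r :: rs) :: R) v (by simp) (by simp [PySem.List.pyGetD_zero_cons])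
  simpa [PySem.List.pyGetD_zero_cons] using h

-- small literal ranges and slices
lemma pyRange01 : PySem.List.pyRange 0 (1 : Int) 1 = [0] := by
  simpa using PySem.List.pyRange_one_singleton 0

lemma pyRange02 : PySem.List.pyRange 0 (2 : Int) 1 = [0, 1] := by
  rw [PySem.List.pyRange_one_cons (by norm_num)]
  norm_num
  simpa using PySem.List.pyRange_one_singleton 1

lemma slice_to_1 {α : Type} (xs : List α) : PySem.List.slice xs none (some 1) = xs.take 1 := by
  rw [PySem.List.slice_to xs (by norm_num), Int.toNat_one]

lemma slice_from_1 {α : Type} (xs : List α) : PySem.List.slice xs (some 1) none = xs.drop 1 := by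
  rw [PySem.List.slice_from xs (by norm_num), Int.toNat_one]

lemma take1 {α : Type} (x : α) (xs : List α) : List.take 1 (x :: xs) = [x] := rfl
lemma drop1 {α : Type} (x : α) (xs : List α) : List.drop 1 (x :: xs) = xs := rfl

-- matrix_sum / matrix_minus on 1×1 matrices
lemma msum_11 (p q : Int) : pv_msum [[p]] [[q]] = [[p + q]] := by
  simp [pv_msum, pyRange01, PySem.List.pyGetD_ofNat']

lemma mminus_11 (p q : Int) : pv_mminus [[p]] [[q]] = [[p - q]] := by
  simp [pv_mminus, pyRange01, PySem.List.pyGetD_ofNat']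

-- n = 2 on two-row matrices with ≥ 2 leading entries per row: A equals B
lemma n2_case (x0 x1 : Int) (t0 : List Int) (u0 u1 : Int) (t1 : List Int)
    (y0 y1 : Int) (s0 : List Int) (v0 v1 : Int) (s1 : List Int) :
    strassen_multiplication [x0 :: x1 :: t0, u0 :: u1 :: t1] [y0 :: y1 :: s0, v0 :: v1 :: s1] 2
      = strassen_multiplication_alt [x0 :: x1 :: t0, u0 :: u1 :: t1] [y0 :: y1 :: s0, v0 :: v1 :: s1] 2 := by
  unfold strassen_multiplication strassen_multiplication_alt
  rw [if_neg (show ¬ (2 : Int) < 1 by norm_num)]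
  rw [show ((2 : Int).toNat + 1) = 2 + 1 from rfl]
  rw [strassenFuel.eq_2]
  rw [if_neg (show ¬ (2 : Int) = 1 by norm_num)]
  rw [show PySem.Int.floordiv 2 2 = 1 from by decide]
  simp only [slice_to_1, slice_from_1, take1, drop1, List.map_cons, List.map_nil]
  simp only [fuel_one2, ent00_msum', ent00_mminus']
  simp only [PySem.List.pyGetD_ofNat', List.getD_cons_zero]
  simp only [msum_11, mminus_11]
  simp only [pyRange01, pyRange02, List.foldl_cons, List.foldl_nil, List.map_cons, List.map_nil,
    PySem.List.pyGetD_ofNat', List.getD_cons_zero, List.getD_cons_succ,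
    List.nil_append, List.cons_append, List.sum_cons, List.sum_nil, add_zero]
  ring_nf

-- ===== VERDICT (by name: the statement is the Claim_ definition above) =====
theorem strassen_multiplication_spec : Claim_equal_strassen_multiplication := by
  intro a b n _ hpre
  unfold Spec_strassen_multiplication
  rcases hpre with ⟨hn, -, -, -, -⟩ | ⟨hn, ha2, hb2⟩ | ⟨⟨hn1, hp⟩, hsa, hsb⟩
  · subst hn
    have hB := alt_mkM a b 1
    rw [show ((1 : Nat) : Int) = 1 by norm_num] at hB
    rw [hB]
    show [[PySem.List.pyGetD (PySem.List.pyGetD a 0 []) 0 0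
        * PySem.List.pyGetD (PySem.List.pyGetD b 0 []) 0 0]] = _
    simp [mkM, mulE, entM, PySem.List.pyGetD_zero]
  · subst hn
    obtain ⟨r0, r1, rfl⟩ : ∃ r0 r1, a = [r0, r1] := by
      match a, ha2.1 with
      | [r0, r1], _ => exact ⟨r0, r1, rfl⟩
    obtain ⟨q0, q1, rfl⟩ : ∃ q0 q1, b = [q0, q1] := by
      match b, hb2.1 with
      | [q0, q1], _ => exact ⟨q0, q1, rfl⟩
    obtain ⟨x0, x1, t0, rfl⟩ : ∃ x0 x1 t0, r0 = x0 :: x1 :: t0 := by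
      match r0, ha2.2.1 with
      | x0 :: x1 :: t0, _ => exact ⟨x0, x1, t0, rfl⟩
      | [], h => simp at h
      | [x], h => simp at h
    obtain ⟨u0, u1, t1, rfl⟩ : ∃ u0 u1 t1, r1 = u0 :: u1 :: t1 := by
      have h2 : 2 ≤ r1.length := le_trans ha2.2.1 ha2.2.2
      match r1, h2 with
      | u0 :: u1 :: t1, _ => exact ⟨u0, u1, t1, rfl⟩
    obtain ⟨y0, y1, s0, rfl⟩ : ∃ y0 y1 s0, q0 = y0 :: y1 :: s0 := by
      match q0, hb2.2.1 with
      | y0 :: y1 :: s0, _ => exact ⟨y0, y1, s0, rfl⟩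
    obtain ⟨v0, v1, s1, rfl⟩ : ∃ v0 v1 s1, q1 = v0 :: v1 :: s1 := by
      have h2 : 2 ≤ q1.length := le_trans hb2.2.1 hb2.2.2
      match q1, h2 with
      | v0 :: v1 :: s1, _ => exact ⟨v0, v1, s1, rfl⟩
    exact n2_case x0 x1 t0 u0 u1 t1 y0 y1 s0 v0 v1 s1
  · obtain ⟨K, hK⟩ : ∃ K : Nat, n = ((2 ^ K : Nat) : Int) :=
      ⟨PySem.Int.bitLength n - 1, by push_cast; exact hp⟩
    subst hK
    have htn : (((2 ^ K : Nat) : Int)).toNat = 2 ^ K := Int.toNat_natCast _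
    have hsa' : sqN a (2 ^ K) := ⟨htn ▸ hsa.1, htn ▸ hsa.2⟩
    have hsb' : sqN b (2 ^ K) := ⟨htn ▸ hsb.1, htn ▸ hsb.2⟩
    unfold strassen_multiplication
    rw [htn]
    rw [strassen_pow2 K (2 ^ K + 1) a b
      (by have : K < 2 ^ K := Nat.lt_two_pow_self; omega) hsa' hsb', alt_mkM]
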